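-- pv_equiv track=rewrite | github.com/wangyuheng/cinder | cinder_cli/extended_proxy_decision.py | _select_low_structure
-- ===== SOURCE A (Python) =====
-- from typing import Any
--
-- def _select_low_structure(options: list[dict[str, Any]]) -> dict[str, Any]:
--     """Select option with lowest structure/complexity."""
--     if not options:
--         return {}
--
--     scored_options = []
--     for option in options:
--         complexity = option.get("complexity", "medium")
--         score = {"low": 3, "medium": 2, "high": 1}.get(complexity, 2)
--         scored_options.append((option, score))
--
--     scored_options.sort(key=lambda x: x[1], reverse=True)
--     return scored_options[0][0]
-- ===== SOURCE B (Python) =====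
-- def _select_low_structure(options):
--     """Select option with lowest structure/complexity."""
--     scores = {"low": 3, "medium": 2, "high": 1}
--     table = {}
--     for option in options:
--         s = scores.get(option.get("complexity", "medium"), 2)
--         if s not in table:
--             table[s] = option
--     for s in (3, 2, 1):
--         if s in table:
--             return table[s]
--     return {}
-- ===== Notes on version B (the rewrite author's own statement) =====
-- stated objective: alternative
-- what changed: Replaced A's build-a-scored-list, stable descending sort and take-the-head with a single pass that fills a first-seen bucket per score level (3/2/1) in a dict, followed by a fixed-priority lookup 3, then 2, then 1.
import Mathlib
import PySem

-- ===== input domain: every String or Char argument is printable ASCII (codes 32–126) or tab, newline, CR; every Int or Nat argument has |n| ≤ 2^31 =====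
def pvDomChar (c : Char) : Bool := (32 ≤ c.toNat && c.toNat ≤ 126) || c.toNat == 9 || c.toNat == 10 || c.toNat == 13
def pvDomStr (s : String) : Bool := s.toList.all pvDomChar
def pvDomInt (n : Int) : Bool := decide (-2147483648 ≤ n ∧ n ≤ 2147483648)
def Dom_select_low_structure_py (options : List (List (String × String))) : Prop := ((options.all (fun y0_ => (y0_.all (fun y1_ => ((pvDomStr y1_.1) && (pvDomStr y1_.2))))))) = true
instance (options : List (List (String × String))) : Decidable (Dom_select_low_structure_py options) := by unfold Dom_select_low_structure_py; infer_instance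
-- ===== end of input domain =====

-- B replaces A's build-scored-list + stable descending sort + take-head with one pass
-- filling a first-seen bucket per score level and a fixed-priority lookup 3→2→1 (alternative decomposition).

-- ===== PORT A =====
-- shared scoring expression of both Pythons: {"low":3,"medium":2,"high":1}.get(option.get("complexity","medium"), 2)
def pvComplexityScore (option : List (String × String)) : Int :=
  let complexity := PySem.Dict.getD (PySem.Dict.mk option) "complexity" "medium"
  PySem.Dict.getD (PySem.Dict.ofList [("low", (3 : Int)), ("medium", 2), ("high", 1)]) complexity 2

def select_low_structure_py (options : List (List (String × String))) : List (String × String) :=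
  if options = [] then []
  else
    let scored_options := options.foldl
      (fun acc option => acc ++ [(option, pvComplexityScore option)]) []
    let sortedScored := PySem.List.sorted scored_options (fun x => x.2) true
    (PySem.List.pyGetD sortedScored 0 ([], 0)).1

-- ===== PORT B =====
def select_low_structure_py_alt (options : List (List (String × String))) : List (String × String) :=
  let table : PySem.Dict Int (List (String × String)) :=
    options.foldl (fun t option =>
      let s := pvComplexityScore option
      if t.contains s then t else t.insert s option) PySem.Dict.empty
  match table.get? 3 with
  | some o => o
  | none =>
    match table.get? 2 with
    | some o => o
    | none =>
      match table.get? 1 with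
      | some o => o
      | none => []

-- ===== PRECONDITION & SPEC =====
def Spec_select_low_structure_py (options : List (List (String × String))) (out : List (String × String)) : Prop := out = select_low_structure_py_alt options
instance (options : List (List (String × String))) (out : List (String × String)) : Decidable (Spec_select_low_structure_py options out) := by unfold Spec_select_low_structure_py; infer_instance

-- ===== CLAIM (what is proved, stated in full; the proofs are below) =====
def Claim_equal_select_low_structure_py : Prop := ∀ (options : List (List (String × String))), Dom_select_low_structure_py options → Spec_select_low_structure_py options (select_low_structure_py options)

-- ===== LEMMAS AND PROOFS =====

-- first-occurrence running maximum over the scores (strict improvement replaces)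
def pvBest (m : List (String × String)) (opts : List (List (String × String))) : List (String × String) :=
  opts.foldl (fun m o => if pvComplexityScore m < pvComplexityScore o then o else m) m

-- find the first option at a given score level
def pvFindAt (s : Int) (opts : List (List (String × String))) : Option (List (String × String)) :=
  opts.find? (fun o => pvComplexityScore o == s)

theorem pvScore_cases (o : List (String × String)) :
    pvComplexityScore o = 1 ∨ pvComplexityScore o = 2 ∨ pvComplexityScore o = 3 := by
  unfold pvComplexityScore
  generalize (PySem.Dict.getD (PySem.Dict.mk o) "complexity" "medium") = c
  by_cases h1 : c = "low"
  · subst h1; right; right; decide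
  · by_cases h2 : c = "medium"
    · subst h2; right; left; decide
    · by_cases h3 : c = "high"
      · subst h3; left; decide
      · right; left
        have h1' : ¬ (("low" : String) = c) := fun h => h1 h.symm
        have h2' : ¬ (("medium" : String) = c) := fun h => h2 h.symm
        have h3' : ¬ (("high" : String) = c) := fun h => h3 h.symm
        have hof : (PySem.Dict.ofList [("low", (3 : Int)), ("medium", 2), ("high", 1)]).items
            = [("low", (3 : Int)), ("medium", 2), ("high", 1)] := by decide
        have b1 : ((("low" : String)) == c) = false := by simp [h1']
        have b2 : ((("medium" : String)) == c) = false := by simp [h2']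
        have b3 : ((("high" : String)) == c) = false := by simp [h3']
        simp [PySem.Dict.getD, PySem.Dict.get?, hof, List.find?, b1, b2, b3]

-- running strict-improvement argmax step
def pvArgmaxStep {α : Type} (key : α → Int) (b : Option α) (x : α) : Option α :=
  match b with
  | none => some x
  | some m => if key m < key x then some x else b

-- head of the reverse stable sort is the first strict-improvement running maximum
theorem head_sorted_rev {α : Type} (xs : List α) (key : α → Int) :
    (PySem.List.sorted xs key true).head? = xs.foldl (pvArgmaxStep key) none := by
  induction xs using List.reverseRecOn with
  | nil => rfl
  | append_singleton xs x ih =>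
    rw [PySem.List.sorted_rev_eq_foldl_insertBy] at ih ⊢
    rw [List.foldl_append, List.foldl_append]
    simp only [List.foldl_cons, List.foldl_nil]
    cases h : List.foldl (fun acc x => PySem.List.insertBy (fun a b => decide (key b < key a)) x acc) [] xs with
    | nil =>
      rw [h] at ih
      simp only [List.head?] at ih
      rw [← ih]
      simp [PySem.List.insertBy, pvArgmaxStep]
    | cons hd tl =>
      rw [h] at ih
      simp only [List.head?] at ih
      rw [← ih]
      by_cases hlt : key hd < key x
      · simp [PySem.List.insertBy, pvArgmaxStep, hlt]
      · simp [PySem.List.insertBy, pvArgmaxStep, hlt]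

-- the paired foldl (over A's (option, score) pairs) tracks pvBest
theorem foldl_pair (opts : List (List (String × String))) :
    ∀ (m : List (String × String)),
      opts.foldl (fun b o => pvArgmaxStep (fun x => x.2) b (o, pvComplexityScore o))
        (some (m, pvComplexityScore m))
      = some (pvBest m opts, pvComplexityScore (pvBest m opts)) := by
  induction opts with
  | nil => intro m; rfl
  | cons o rest ih =>
    intro m
    have step : pvBest m (o :: rest) = pvBest (if pvComplexityScore m < pvComplexityScore o then o else m) rest := rfl
    by_cases h : pvComplexityScore m < pvComplexityScore o
    · rw [step, if_pos h, List.foldl_cons]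
      simp only [pvArgmaxStep, if_pos h]
      exact ih o
    · rw [step, if_neg h, List.foldl_cons]
      simp only [pvArgmaxStep, if_neg h]
      exact ih m

theorem foldl_pair_none (m : List (String × String)) (rest : List (List (String × String))) :
    List.foldl (fun b o => pvArgmaxStep (fun x => x.2) b (o, pvComplexityScore o)) none (m :: rest)
      = some (pvBest m rest, pvComplexityScore (pvBest m rest)) := by
  rw [List.foldl_cons]
  exact foldl_pair rest m

-- the running maximum equals priority search 3 → 2 → 1
theorem pvBest_eq_prio (opts : List (List (String × String))) :
    ∀ (m : List (String × String)),
      some (pvBest m opts)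
      = ((pvFindAt 3 (m :: opts)).orElse fun _ =>
          (pvFindAt 2 (m :: opts)).orElse fun _ => pvFindAt 1 (m :: opts)) := by
  induction opts with
  | nil =>
    intro m
    rcases pvScore_cases m with h | h | h <;>
      simp [pvBest, pvFindAt, List.find?, h]
  | cons o rest ih =>
    intro m
    have hm := pvScore_cases m
    have ho := pvScore_cases o
    have step : pvBest m (o :: rest) = pvBest (if pvComplexityScore m < pvComplexityScore o then o else m) rest := rfl
    rcases hm with hm | hm | hm <;> rcases ho with ho | ho | ho <;>
      (rw [step, hm, ho]
       norm_num
       rw [ih]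
       cases h3 : pvFindAt 3 rest <;> cases h2 : pvFindAt 2 rest <;> cases h1 : pvFindAt 1 rest <;>
         simp [pvFindAt, List.find?_cons, hm, ho, h3, h2, h1])

-- B's table lookup is priority find
theorem table_get (opts : List (List (String × String))) :
    ∀ (t : PySem.Dict Int (List (String × String))) (q : Int),
      (opts.foldl (fun t option =>
        let s := pvComplexityScore option
        if t.contains s then t else t.insert s option) t).get? q
      = (t.get? q).orElse fun _ => pvFindAt q opts := by
  induction opts with
  | nil => intro t q; cases h : t.get? q <;> simp [pvFindAt, Option.orElse, h]
  | cons o rest ih =>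
    intro t q
    simp only [List.foldl_cons]
    by_cases hq : pvComplexityScore o = q
    · have hfind : pvFindAt q (o :: rest) = some o := by
        simp [pvFindAt, List.find?, hq]
      rw [hfind]
      by_cases hc : t.contains (pvComplexityScore o)
      · have hsome : ∃ v, t.get? q = some v := by
          have := PySem.Dict.contains_eq_isSome_get? t (pvComplexityScore o)
          rw [hc] at this
          rw [← hq]
          exact Option.isSome_iff_exists.mp this.symm
        obtain ⟨v, hv⟩ := hsome
        simp only [hc, if_true, ih, hv]
        rfl
      · simp only [hc, Bool.false_eq_true, if_false, ih]
        have hnone : t.get? q = none := by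
          have := PySem.Dict.contains_eq_isSome_get? t (pvComplexityScore o)
          rw [Bool.not_eq_true] at hc
          rw [hc] at this
          rw [← hq]
          cases h : t.get? (pvComplexityScore o)
          · rfl
          · rw [h] at this; simp at this
        rw [hq, PySem.Dict.get?_insert_self, hnone]
        rfl
    · have hb : (pvComplexityScore o == q) = false := by simp [hq]
      have hfind : pvFindAt q (o :: rest) = pvFindAt q rest := by
        simp [pvFindAt, List.find?, hb]
      rw [hfind]
      by_cases hc : t.contains (pvComplexityScore o)
      · simp only [hc, if_true, ih]
      · simp only [hc, Bool.false_eq_true, if_false, ih,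
          PySem.Dict.get?_insert_of_ne t (k := pvComplexityScore o) (k' := q) o (fun h => hq h.symm)]

theorem alt_eq_prio (opts : List (List (String × String))) :
    select_low_structure_py_alt opts
      = (((pvFindAt 3 opts).orElse fun _ =>
          (pvFindAt 2 opts).orElse fun _ => pvFindAt 1 opts)).getD [] := by
  unfold select_low_structure_py_alt
  simp only [table_get opts PySem.Dict.empty]
  have he : ∀ q : Int, (PySem.Dict.empty (κ := Int) (ν := List (String × String))).get? q = none := fun _ => rfl
  simp only [he]
  cases pvFindAt 3 opts <;> cases pvFindAt 2 opts <;> cases pvFindAt 1 opts <;> rfl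

-- ===== VERDICT (by name: the statement is the Claim_ definition above) =====
theorem select_low_structure_py_spec : Claim_equal_select_low_structure_py := by
  intro options _
  unfold Spec_select_low_structure_py
  rw [alt_eq_prio]
  cases options with
  | nil => rfl
  | cons m rest =>
    unfold select_low_structure_py
    simp only [if_neg (List.cons_ne_nil m rest)]
    rw [PySem.List.foldl_append_singleton_eq_map, List.nil_append]
    rw [PySem.List.pyGetD_zero]
    have hh := head_sorted_rev ((m :: rest).map (fun o => (o, pvComplexityScore o))) (fun x => x.2)
    rw [List.foldl_map] at hh
    rw [foldl_pair_none m rest] at hh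
    rw [← pvBest_eq_prio rest m]
    cases hs : PySem.List.sorted ((m :: rest).map (fun o => (o, pvComplexityScore o))) (fun x => x.2) true with
    | nil =>
      rw [hs] at hh
      simp at hh
    | cons p tl =>
      rw [hs] at hh
      simp only [List.head?] at hh
      have hp : p = (pvBest m rest, pvComplexityScore (pvBest m rest)) := by
        injection hh
      rw [hp]
      rfl
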